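-- pv_equiv track=rewrite | github.com/ke4king/invoice_system | backend/app/services/performance_monitoring_service.py | _determine_health_status
-- ===== SOURCE A (Python) =====
-- from typing import Dict, Any, List, Optional
--
-- def _determine_health_status(metrics: Dict[str, Any], alerts: List[Dict[str, Any]]) -> str:
--     """确定系统健康状态"""
--     if not alerts:
--         return "healthy"
--
--     # 检查严重程度
--     critical_alerts = [a for a in alerts if a.get("details", {}).get("severity") == "critical"]
--     high_alerts = [a for a in alerts if a.get("details", {}).get("severity") == "high"]
--
--     if critical_alerts:
--         return "critical"
--     elif high_alerts:
--         return "degraded"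
--     elif alerts:
--         return "warning"
--     else:
--         return "healthy"
-- ===== SOURCE B (Python) =====
-- def _determine_health_status(metrics, alerts):
--     """Fold the alerts into one worst-severity rank, then map it back to a status."""
--     if not alerts:
--         return "healthy"
--     worst = 1
--     for a in alerts:
--         sev = a.get("details", {}).get("severity")
--         rank = 3 if sev == "critical" else (2 if sev == "high" else 1)
--         if rank > worst:
--             worst = rank
--     return "critical" if worst == 3 else ("degraded" if worst == 2 else "warning")
-- ===== Notes on version B (the rewrite author's own statement) =====
-- stated objective: simpler
-- what changed: Replaced the two filter passes plus branch chain by a single fold computing the maximum severity rank, mapped back to a status string (the unreachable non-empty 'healthy' branch is gone).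
import Mathlib
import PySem

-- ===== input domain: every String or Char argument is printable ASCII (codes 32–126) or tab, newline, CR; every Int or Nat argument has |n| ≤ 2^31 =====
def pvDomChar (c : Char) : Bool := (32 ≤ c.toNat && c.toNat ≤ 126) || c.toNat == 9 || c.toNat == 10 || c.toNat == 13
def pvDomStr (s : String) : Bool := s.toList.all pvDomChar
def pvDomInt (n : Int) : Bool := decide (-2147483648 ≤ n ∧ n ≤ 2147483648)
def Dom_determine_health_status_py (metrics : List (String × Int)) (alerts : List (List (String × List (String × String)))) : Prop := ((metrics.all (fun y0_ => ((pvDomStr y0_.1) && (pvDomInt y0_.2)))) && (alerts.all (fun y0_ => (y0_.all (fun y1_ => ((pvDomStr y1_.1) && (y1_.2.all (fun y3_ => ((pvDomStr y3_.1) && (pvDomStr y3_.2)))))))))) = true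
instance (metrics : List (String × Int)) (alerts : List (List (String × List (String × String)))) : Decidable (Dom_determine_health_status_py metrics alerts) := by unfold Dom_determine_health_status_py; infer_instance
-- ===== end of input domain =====

-- B replaces A's two filter passes and branch chain by a single max-rank fold (objective: simpler).

-- shared accessor: a.get("details", {}).get("severity")
def pvSev (a : List (String × List (String × String))) : Option String :=
  PySem.Dict.get? (PySem.Dict.ofList ((PySem.Dict.ofList a).getD "details" [])) "severity"

-- ===== PORT A =====
def determine_health_status_py (metrics : List (String × Int)) (alerts : List (List (String × List (String × String)))) : String :=
  if alerts = [] then "healthy"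
  else
    let critical_alerts := alerts.filter (fun a => decide (pvSev a = some "critical"))
    let high_alerts := alerts.filter (fun a => decide (pvSev a = some "high"))
    if critical_alerts ≠ [] then "critical"
    else if high_alerts ≠ [] then "degraded"
    else if alerts ≠ [] then "warning"
    else "healthy"

-- ===== PORT B =====
def pvRank (a : List (String × List (String × String))) : Nat :=
  if pvSev a = some "critical" then 3 else if pvSev a = some "high" then 2 else 1

def determine_health_status_py_alt (metrics : List (String × Int)) (alerts : List (List (String × List (String × String)))) : String :=
  if alerts = [] then "healthy"
  else
    let worst := alerts.foldl (fun m a => max m (pvRank a)) 1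
    if worst = 3 then "critical" else if worst = 2 then "degraded" else "warning"

-- ===== PRECONDITION & SPEC =====
def Spec_determine_health_status_py (metrics : List (String × Int)) (alerts : List (List (String × List (String × String)))) (out : String) : Prop := out = determine_health_status_py_alt metrics alerts
instance (metrics : List (String × Int)) (alerts : List (List (String × List (String × String)))) (out : String) : Decidable (Spec_determine_health_status_py metrics alerts out) := by unfold Spec_determine_health_status_py; infer_instance

-- ===== CLAIM (what is proved, stated in full; the proofs are below) =====
def Claim_equal_determine_health_status_py : Prop := ∀ (metrics : List (String × Int)) (alerts : List (List (String × List (String × String)))), Dom_determine_health_status_py metrics alerts → Spec_determine_health_status_py metrics alerts (determine_health_status_py metrics alerts)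

-- ===== LEMMAS AND PROOFS =====

-- the fold computes the maximum severity rank, characterized by the two 'any' tests
theorem pv_fold_char (l : List (List (String × List (String × String)))) (r : Nat) (hr : 1 ≤ r) (hr3 : r ≤ 3) :
    l.foldl (fun m a => max m (pvRank a)) r =
      if l.any (fun a => decide (pvSev a = some "critical")) then 3
      else if l.any (fun a => decide (pvSev a = some "high")) then max r 2
      else r := by
  induction l generalizing r with
  | nil => simp
  | cons a l ih =>
    by_cases hc : pvSev a = some "critical"
    · have h3 : pvRank a = 3 := by simp [pvRank, hc]
      have hc' : decide (pvSev a = some "critical") = true := by simp [hc]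
      simp only [List.foldl_cons, List.any_cons, hc', Bool.true_or, if_true, h3]
      rw [ih (max r 3) (by omega) (by omega)]
      split_ifs <;> omega
    · have hc' : decide (pvSev a = some "critical") = false := by simp [hc]
      by_cases hh : pvSev a = some "high"
      · have h2 : pvRank a = 2 := by simp [pvRank, hc, hh]
        have hh' : decide (pvSev a = some "high") = true := by simp [hh]
        simp only [List.foldl_cons, List.any_cons, hc', hh', Bool.false_or, Bool.true_or, if_true, h2]
        rw [ih (max r 2) (by omega) (by omega)]
        split_ifs <;> omega
      · have h1 : pvRank a = 1 := by simp [pvRank, hc, hh]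
        have hh' : decide (pvSev a = some "high") = false := by simp [hh]
        simp only [List.foldl_cons, List.any_cons, hc', hh', Bool.false_or, h1]
        rw [ih (max r 1) (by omega) (by omega)]
        split_ifs <;> omega

-- ===== VERDICT (by name: the statement is the Claim_ definition above) =====
theorem determine_health_status_py_spec : Claim_equal_determine_health_status_py := by
  intro metrics alerts _
  unfold Spec_determine_health_status_py determine_health_status_py determine_health_status_py_alt
  by_cases hnil : alerts = []
  · simp [hnil]
  · simp only [hnil, if_false]
    rw [pv_fold_char alerts 1 (by omega) (by omega)]
    by_cases hc : alerts.any (fun a => decide (pvSev a = some "critical")) = true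
    · have : alerts.filter (fun a => decide (pvSev a = some "critical")) ≠ [] := by
        rw [ne_eq, List.filter_eq_nil_iff]
        obtain ⟨a, ha, hpa⟩ := List.any_eq_true.mp hc
        exact fun h => h a ha hpa
      simp [hc, this]
    · have hcf : alerts.filter (fun a => decide (pvSev a = some "critical")) = [] := by
        rw [List.filter_eq_nil_iff]
        intro a ha hpa
        exact hc (List.any_eq_true.mpr ⟨a, ha, hpa⟩)
      by_cases hh : alerts.any (fun a => decide (pvSev a = some "high")) = true
      · have : alerts.filter (fun a => decide (pvSev a = some "high")) ≠ [] := by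
          rw [ne_eq, List.filter_eq_nil_iff]
          obtain ⟨a, ha, hpa⟩ := List.any_eq_true.mp hh
          exact fun h => h a ha hpa
        simp [hc, hh, hcf, this]
      · have hhf : alerts.filter (fun a => decide (pvSev a = some "high")) = [] := by
          rw [List.filter_eq_nil_iff]
          intro a ha hpa
          exact hh (List.any_eq_true.mpr ⟨a, ha, hpa⟩)
        simp [hc, hh, hcf, hhf, hnil]
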